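-- pv_equiv track=rewrite | github.com/1davan/brain-agent | app/services/action_planner.py | is_affirmative
-- ===== SOURCE A (Python) =====
-- def is_affirmative(message: str) -> bool:
--     """Check if message is an affirmative response."""
--     affirmatives = [
--         'yes', 'yeah', 'yep', 'yup', 'sure', 'ok', 'okay',
--         'do it', 'send it', 'send', 'go ahead', 'confirm', 'approved',
--         'absolutely', 'definitely', 'please do', 'proceed'
--     ]
--     msg_lower = message.lower().strip()
--     return any(aff in msg_lower for aff in affirmatives)
-- ===== SOURCE B (Python) =====
-- AFFIRMATIVES = (
--     'yes', 'yeah', 'yep', 'yup', 'sure', 'ok', 'okay',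
--     'do it', 'send it', 'send', 'go ahead', 'confirm', 'approved',
--     'absolutely', 'definitely', 'please do', 'proceed'
-- )
--
--
-- def is_affirmative(message: str) -> bool:
--     """Position-major scan: one left-to-right pass over the normalized
--     message, testing at each position whether any affirmative starts there."""
--     msg = message.lower().strip()
--     return any(msg.startswith(AFFIRMATIVES, i) for i in range(len(msg) + 1))
-- ===== Notes on version B (the rewrite author's own statement) =====
-- stated objective: alternative
-- what changed: Keyword-major iteration (one full substring search per keyword) is replaced by a single position-major left-to-right pass that tests all keywords as prefixes at each position via str.startswith with a tuple and a start index.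
import Mathlib
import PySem

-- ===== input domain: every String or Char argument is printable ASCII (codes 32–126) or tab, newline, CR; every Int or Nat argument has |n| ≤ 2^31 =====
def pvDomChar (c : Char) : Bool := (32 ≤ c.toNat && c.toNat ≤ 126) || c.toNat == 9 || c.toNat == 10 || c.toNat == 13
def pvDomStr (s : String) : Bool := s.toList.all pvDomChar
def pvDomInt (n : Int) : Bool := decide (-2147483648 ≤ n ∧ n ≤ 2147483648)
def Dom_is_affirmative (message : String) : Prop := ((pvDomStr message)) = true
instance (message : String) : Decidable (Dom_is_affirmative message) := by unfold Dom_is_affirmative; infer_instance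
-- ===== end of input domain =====

-- B replaces the per-keyword substring scans with one position-major pass; objective: alternative.

-- ===== PORT A =====
def affirmativesA : List String :=
  ["yes", "yeah", "yep", "yup", "sure", "ok", "okay",
   "do it", "send it", "send", "go ahead", "confirm", "approved",
   "absolutely", "definitely", "please do", "proceed"]

def is_affirmative (message : String) : Bool :=
  let msg_lower := PySem.Str.strip (PySem.Str.lower message)
  affirmativesA.any (fun aff => PySem.Str.isIn aff msg_lower)

-- ===== PORT B =====
def affirmativesB : List (List Char) :=
  ["yes".toList, "yeah".toList, "yep".toList, "yup".toList, "sure".toList,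
   "ok".toList, "okay".toList, "do it".toList, "send it".toList, "send".toList,
   "go ahead".toList, "confirm".toList, "approved".toList, "absolutely".toList,
   "definitely".toList, "please do".toList, "proceed".toList]

-- one pass over positions: at each suffix, does some affirmative start here?
def pvScan : List Char → Bool
  | [] => affirmativesB.any (fun a => a.isPrefixOf [])
  | c :: t => affirmativesB.any (fun a => a.isPrefixOf (c :: t)) || pvScan t

def is_affirmative_alt (message : String) : Bool :=
  pvScan (PySem.Str.strip (PySem.Str.lower message)).toList

-- ===== PRECONDITION & SPEC =====
def Spec_is_affirmative (message : String) (out : Bool) : Prop := out = is_affirmative_alt message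
instance (message : String) (out : Bool) : Decidable (Spec_is_affirmative message out) := by unfold Spec_is_affirmative; infer_instance

-- ===== CLAIM (what is proved, stated in full; the proofs are below) =====
def Claim_equal_is_affirmative : Prop := ∀ (message : String), Dom_is_affirmative message → Spec_is_affirmative message (is_affirmative message)

-- ===== LEMMAS AND PROOFS =====

lemma scan_eq (cs : List Char) :
    affirmativesA.any (fun a => PySem.Chars.isIn a.toList cs) = pvScan cs := by
  induction cs with
  | nil => decide
  | cons c t ih =>
    have hmap : ∀ (p : List Char → Bool),
        affirmativesB.any p = affirmativesA.any (fun a => p a.toList) := by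
      intro p
      rw [show affirmativesB = affirmativesA.map String.toList from rfl, List.any_map]
      rfl
    rw [pvScan, ← ih, hmap, Bool.eq_iff_iff]
    simp only [List.any_eq_true, Bool.or_eq_true, PySem.Chars.isIn_iff_infix,
      List.infix_cons_iff, List.isPrefixOf_iff_prefix]
    exact ⟨fun ⟨a, ha, h⟩ => h.elim (fun h => Or.inl ⟨a, ha, h⟩) (fun h => Or.inr ⟨a, ha, h⟩),
      fun h => h.elim (fun ⟨a, ha, h⟩ => ⟨a, ha, Or.inl h⟩) (fun ⟨a, ha, h⟩ => ⟨a, ha, Or.inr h⟩)⟩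

-- ===== VERDICT (by name: the statement is the Claim_ definition above) =====
theorem is_affirmative_spec : Claim_equal_is_affirmative := by
  intro msg _
  unfold Spec_is_affirmative is_affirmative is_affirmative_alt
  simp only [PySem.Str.isIn_eq]
  exact scan_eq _
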